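-- pv_equiv track=rewrite | github.com/luleni/laba4 | laba5/laba5ex2.py | summa_and_multipli
-- ===== SOURCE A (Python) =====
-- def summa_and_multipli(arr):
--     summa = 0
--     multiply = 1
--     for i in arr:
--         summa += i
--     min_index = arr.index(min(arr))
--     max_index = arr.index(max(arr))
--
--     start_index = min(min_index, max_index) + 1
--     end_index = max(min_index, max_index)
--
--     for i in arr[start_index:end_index]:
--         multiply *= i
--     return summa, multiply
-- ===== SOURCE B (Python) =====
-- def summa_and_multipli(arr):
--     mn = mx = arr[0]
--     mn_i = mx_i = 0
--     summa = 0
--     for idx, v in enumerate(arr):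
--         summa += v
--         if v < mn:
--             mn, mn_i = v, idx
--         elif v > mx:
--             mx, mx_i = v, idx
--     lo = min(mn_i, mx_i)
--     hi = max(mn_i, mx_i)
--     multiply = 1
--     for v in arr[lo + 1:hi]:
--         multiply *= v
--     return summa, multiply
-- ===== Notes on version B (the rewrite author's own statement) =====
-- stated objective: alternative
-- what changed: Replaces A's five separate scans (sum loop, min(), max(), two .index scans) by one fused enumerate loop that accumulates the sum and tracks first-occurrence min/max indices, then one slice-product pass.
import Mathlib
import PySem

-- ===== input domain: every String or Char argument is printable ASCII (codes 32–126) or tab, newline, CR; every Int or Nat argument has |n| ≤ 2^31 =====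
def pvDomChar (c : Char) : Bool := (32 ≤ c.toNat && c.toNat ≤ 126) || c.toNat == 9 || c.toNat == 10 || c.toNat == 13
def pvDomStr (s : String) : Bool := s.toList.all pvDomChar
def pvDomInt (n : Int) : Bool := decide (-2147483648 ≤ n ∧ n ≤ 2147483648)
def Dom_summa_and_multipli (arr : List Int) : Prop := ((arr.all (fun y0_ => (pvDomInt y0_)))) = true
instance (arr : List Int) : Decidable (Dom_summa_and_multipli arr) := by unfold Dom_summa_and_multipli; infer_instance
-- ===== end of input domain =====

-- B replaces A's five separate scans by one fused tracking loop plus the slice-product pass (alternative decomposition, same O(n) cost).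

-- ===== PORT A =====
def summa_and_multipli (arr : List Int) : Int × Int :=
  let summa := arr.foldl (fun s i => s + i) 0
  match PySem.List.min? arr (fun y => y), PySem.List.max? arr (fun y => y) with
  | some mn, some mx =>
    match PySem.List.index? arr mn, PySem.List.index? arr mx with
    | some min_index, some max_index =>
      let start_index : Int := ((min min_index max_index : Nat) : Int) + 1
      let end_index : Int := ((max min_index max_index : Nat) : Int)
      let multiply := (PySem.List.slice arr (some start_index) (some end_index)).foldl
        (fun m i => m * i) 1
      (summa, multiply)
    | _, _ => (0, 0)  -- unreachable: mn/mx are members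
  | _, _ => (0, 0)    -- Python raises ValueError here (empty list); excluded by Pre_

-- ===== PORT B =====
-- state: (summa, mn, mn_i, mx, mx_i)
def pvStepB (st : Int × Int × Int × Int × Int) (p : Int × Int) : Int × Int × Int × Int × Int :=
  let (summa, mn, mni, mx, mxi) := st
  let v := p.2
  let summa := summa + v
  if v < mn then (summa, v, p.1, mx, mxi)
  else if v > mx then (summa, mn, mni, v, p.1)
  else (summa, mn, mni, mx, mxi)

def summa_and_multipli_alt (arr : List Int) : Int × Int :=
  match arr with
  | [] => (0, 0)  -- Python raises IndexError (arr[0]) here; excluded by Pre_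
  | a :: _ =>
    let st := (PySem.List.enumerate arr 0).foldl pvStepB (0, a, 0, a, 0)
    let lo := min st.2.2.1 st.2.2.2.2
    let hi := max st.2.2.1 st.2.2.2.2
    let multiply := (PySem.List.slice arr (some (lo + 1)) (some hi)).foldl (fun m v => m * v) 1
    (st.1, multiply)

-- ===== PRECONDITION & SPEC =====
-- Pre_ excludes only the empty list, on which Python A raises ValueError (min of empty sequence).
def Pre_summa_and_multipli (arr : List Int) : Prop := arr ≠ []
instance (arr : List Int) : Decidable (Pre_summa_and_multipli arr) := by unfold Pre_summa_and_multipli; infer_instance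
def pvWitness_summa_and_multipli : List Int := [3, 1, 4, 1, 5]

def Spec_summa_and_multipli (arr : List Int) (out : Int × Int) : Prop := out = summa_and_multipli_alt arr
instance (arr : List Int) (out : Int × Int) : Decidable (Spec_summa_and_multipli arr out) := by unfold Spec_summa_and_multipli; infer_instance

-- ===== CLAIM (what is proved, stated in full; the proofs are below) =====
def Claim_equal_summa_and_multipli : Prop := ∀ (arr : List Int), Dom_summa_and_multipli arr → Pre_summa_and_multipli arr → Spec_summa_and_multipli arr (summa_and_multipli arr)

-- ===== LEMMAS AND PROOFS =====

-- Invariant of B's fused loop: on a :: t it returns the sum, the running min/max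
-- (= foldl min/max, i.e. Python's min()/max()), and casts of their FIRST-occurrence indices.
theorem pvLoopB_spec (a : Int) (t : List Int) :
    ∃ (k K : Nat),
      (PySem.List.enumerate (a :: t) 0).foldl pvStepB (0, a, 0, a, 0) =
        ((a :: t).foldl (fun s i => s + i) 0, t.foldl min a, (k : Int), t.foldl max a, (K : Int)) ∧
      PySem.List.index? (a :: t) (t.foldl min a) = some k ∧
      PySem.List.index? (a :: t) (t.foldl max a) = some K := by
  induction t using List.reverseRecOn with
  | nil =>
    refine ⟨0, 0, ?_, ?_, ?_⟩
    · simp [PySem.List.enumerate_cons, PySem.List.enumerate_nil, pvStepB]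
    · simp
    · simp
  | append_singleton l x ih =>
    obtain ⟨k, K, hst, hmin, hmax⟩ := ih
    have hmn_le : ∀ y ∈ a :: l, l.foldl min a ≤ y := by
      intro y hy
      rcases List.mem_cons.mp hy with h | h
      · exact h ▸ (PySem.List.foldl_min_le l a).1
      · exact (PySem.List.foldl_min_le l a).2 y h
    have hle_mx : ∀ y ∈ a :: l, y ≤ l.foldl max a := by
      intro y hy
      rcases List.mem_cons.mp hy with h | h
      · exact h ▸ (PySem.List.le_foldl_max l a).1
      · exact (PySem.List.le_foldl_max l a).2 y h
    have hmn_mem : l.foldl min a ∈ a :: l := by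
      rcases PySem.List.foldl_min_mem l a with h | h
      · rw [h]; exact List.mem_cons_self
      · exact List.mem_cons_of_mem _ h
    have hmx_mem : l.foldl max a ∈ a :: l := by
      rcases PySem.List.foldl_max_mem l a with h | h
      · rw [h]; exact List.mem_cons_self
      · exact List.mem_cons_of_mem _ h
    have hcons : a :: (l ++ [x]) = (a :: l) ++ [x] := rfl
    have henum : PySem.List.enumerate (a :: (l ++ [x])) 0 =
        PySem.List.enumerate (a :: l) 0 ++ [(((a :: l).length : Int), x)] := by
      rw [hcons, PySem.List.enumerate_append]
      simp [PySem.List.enumerate_cons, PySem.List.enumerate_nil]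
    have hsum : (a :: (l ++ [x])).foldl (fun s i => s + i) 0 =
        (a :: l).foldl (fun s i => s + i) 0 + x := by
      rw [hcons, List.foldl_append]; rfl
    have hminf : (l ++ [x]).foldl min a = min (l.foldl min a) x := by
      rw [List.foldl_append]; rfl
    have hmaxf : (l ++ [x]).foldl max a = max (l.foldl max a) x := by
      rw [List.foldl_append]; rfl
    rw [henum, List.foldl_append, hst]
    by_cases h1 : x < l.foldl min a
    · -- new minimum at index (a::l).length
      refine ⟨(a :: l).length, K, ?_, ?_, ?_⟩
      · have hmx : ¬ x > l.foldl max a := by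
          have := hle_mx a List.mem_cons_self
          have hma : l.foldl min a ≤ a := (PySem.List.foldl_min_le l a).1
          omega
        simp only [List.foldl, List.foldl_append, pvStepB, if_pos h1, hminf, hmaxf]
        rw [min_eq_right (le_of_lt h1), max_eq_left (by omega)]
      · rw [hcons, hminf, min_eq_right (le_of_lt h1)]
        have hnot : x ∉ a :: l := by
          intro hx
          exact absurd (hmn_le x hx) (by omega)
        exact PySem.List.index?_append_singleton_self _ _ hnot
      · rw [hcons, hmaxf, max_eq_left (by
          have := hle_mx a List.mem_cons_self
          have hma : l.foldl min a ≤ a := (PySem.List.foldl_min_le l a).1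
          omega)]
        rw [PySem.List.index?_append_of_mem _ hmx_mem]
        exact hmax
    · by_cases h2 : x > l.foldl max a
      · -- new maximum at index (a::l).length
        refine ⟨k, (a :: l).length, ?_, ?_, ?_⟩
        · simp only [List.foldl, List.foldl_append, pvStepB, if_neg h1, if_pos h2, hminf, hmaxf]
          rw [min_eq_left (by omega), max_eq_right (le_of_lt h2)]
        · rw [hcons, hminf, min_eq_left (by omega)]
          rw [PySem.List.index?_append_of_mem _ hmn_mem]
          exact hmin
        · rw [hcons, hmaxf, max_eq_right (le_of_lt h2)]
          have hnot : x ∉ a :: l := by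
            intro hx
            exact absurd (hle_mx x hx) (by omega)
          exact PySem.List.index?_append_singleton_self _ _ hnot
      · refine ⟨k, K, ?_, ?_, ?_⟩
        · simp only [List.foldl, List.foldl_append, pvStepB, if_neg h1, if_neg h2, hminf, hmaxf]
          rw [min_eq_left (by omega), max_eq_left (by omega)]
        · rw [hcons, hminf, min_eq_left (by omega),
              PySem.List.index?_append_of_mem _ hmn_mem]
          exact hmin
        · rw [hcons, hmaxf, max_eq_left (by omega),
              PySem.List.index?_append_of_mem _ hmx_mem]
          exact hmax

-- ===== VERDICT (by name: the statement is the Claim_ definition above) =====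
theorem summa_and_multipli_spec : Claim_equal_summa_and_multipli := by
  intro arr _ hpre
  match arr with
  | [] => exact absurd rfl hpre
  | a :: t =>
    obtain ⟨k, K, hst, hmin, hmax⟩ := pvLoopB_spec a t
    unfold Spec_summa_and_multipli summa_and_multipli summa_and_multipli_alt
    rw [PySem.List.min?_id_cons, PySem.List.max?_id_cons]
    simp only [hst, hmin, hmax, Nat.cast_min, Nat.cast_max]
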